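-- pv_equiv track=rewrite | github.com/lmiksch/CoFPT | nussinov.py | total_pairs
-- ===== SOURCE A (Python) =====
-- def couple(pair):
-- 	if pair[0].upper() == pair[1].upper() and pair[0] != pair[1]:
-- 		return True
--
-- 	return False
--
-- def total_pairs(rna):
-- 	paired = []
-- 	pairs = 0
-- 	for x in range(len(rna)):
-- 		for z in range(len(rna)):
-- 			if couple((rna[x],rna[z])) and x not in paired and z not in paired:
-- 				pairs += 1
-- 				paired.append(x)
-- 				paired.append(z)
-- 	return pairs
-- ===== SOURCE B (Python) =====
-- def total_pairs(rna):
-- 	counts = {}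
-- 	for c in rna:
-- 		counts[c] = counts.get(c, 0) + 1
-- 	pairs = 0
-- 	for c in counts:
-- 		if 'a' <= c <= 'z':
-- 			pairs += min(counts[c], counts.get(c.upper(), 0))
-- 	return pairs
-- ===== Notes on version B (the rewrite author's own statement) =====
-- stated objective: faster
-- what changed: Replaces the O(n^3) double index scan with a paired-index list by one character-counting pass and a per-lowercase-letter sum of min(lowercase count, uppercase count).
import Mathlib
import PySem

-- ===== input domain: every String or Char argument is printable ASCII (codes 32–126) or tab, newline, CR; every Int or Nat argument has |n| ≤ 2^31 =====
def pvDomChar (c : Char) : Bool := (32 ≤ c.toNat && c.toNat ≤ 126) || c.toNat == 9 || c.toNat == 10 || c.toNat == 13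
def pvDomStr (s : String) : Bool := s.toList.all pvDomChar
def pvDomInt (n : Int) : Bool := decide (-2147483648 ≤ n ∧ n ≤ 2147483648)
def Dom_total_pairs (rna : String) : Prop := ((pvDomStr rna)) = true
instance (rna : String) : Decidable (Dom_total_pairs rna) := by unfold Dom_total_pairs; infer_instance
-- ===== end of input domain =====

-- B replaces A's O(n^3) greedy double index scan by one counting pass plus a per-lowercase-letter min(lower count, upper count) sum; same return value, proved below.

-- ===== PORT A =====
-- rna[i]; the index is always in range where A's loops use it, the .getD ' ' is only a totality default
def chA (rna : String) (i : Int) : Char := (PySem.Str.pyGet? rna i).getD ' '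

def pvCouple (p : Char × Char) : Bool :=
  (PySem.Chars.upperChar p.1 == PySem.Chars.upperChar p.2) && p.1 != p.2

-- body of A's inner 'for z in range(len(rna))' loop; state = (paired, pairs)
def pvInner (rna : String) (x : Int) (st : List Int × Int) (z : Int) : List Int × Int :=
  if pvCouple (chA rna x, chA rna z) && !st.1.contains x && !st.1.contains z
  then (st.1 ++ [x, z], st.2 + 1) else st

-- body of A's outer 'for x in range(len(rna))' loop
def pvOuter (rna : String) (st : List Int × Int) (x : Int) : List Int × Int :=
  (PySem.List.pyRange 0 (PySem.Str.len rna)).foldl (pvInner rna x) st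

def total_pairs (rna : String) : Int :=
  ((PySem.List.pyRange 0 (PySem.Str.len rna)).foldl (pvOuter rna) ([], 0)).2

-- ===== PORT B =====
def total_pairs_alt (rna : String) : Int :=
  let counts := rna.toList.foldl (fun d c => d.insert c (d.getD c 0 + 1)) PySem.Dict.empty
  counts.keys.foldl (fun pairs c =>
    if 'a' ≤ c ∧ c ≤ 'z'
    then pairs + min (counts.getD c 0) (counts.getD (PySem.Chars.upperChar c) 0)
    else pairs) 0

-- ===== PRECONDITION & SPEC =====
def Spec_total_pairs (rna : String) (out : Int) : Prop := out = total_pairs_alt rna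
instance (rna : String) (out : Int) : Decidable (Spec_total_pairs rna out) := by unfold Spec_total_pairs; infer_instance

-- ===== CLAIM (what is proved, stated in full; the proofs are below) =====
def Claim_equal_total_pairs : Prop := ∀ (rna : String), Dom_total_pairs rna → Spec_total_pairs rna (total_pairs rna)

-- ===== LEMMAS AND PROOFS =====

-- proof-side notation
def pvFlat (M : List (Int × Int)) : List Int := M.flatMap (fun q => [q.1, q.2])

def pvN (rna : String) : Int := (rna.toList.length : Int)

def pvPairOK (rna : String) (q : Int × Int) : Prop :=
  0 ≤ q.1 ∧ q.1 < pvN rna ∧ 0 ≤ q.2 ∧ q.2 < pvN rna ∧ pvCouple (chA rna q.1, chA rna q.2) = true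

-- the lowercase letter of a matched pair
def pvKey (rna : String) (q : Int × Int) : Char :=
  if 'a' ≤ chA rna q.1 ∧ chA rna q.1 ≤ 'z' then chA rna q.1 else chA rna q.2

-- every position below k that is still unpaired has no unpaired partner anywhere
def pvDead (rna : String) (k : Int) (P : List Int) : Prop :=
  ∀ i : Int, 0 ≤ i → i < k → i ∉ P →
    ∀ j : Int, 0 ≤ j → j < pvN rna → j ∉ P → pvCouple (chA rna i, chA rna j) = false

theorem pvChar_eq_of_toNat {c d : Char} (h : c.toNat = d.toNat) : c = d :=
  Char.ext (UInt32.toNat_inj.mp h)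
theorem pvUp_toNat {c : Char} (h : 97 ≤ c.toNat ∧ c.toNat ≤ 122) :
    (PySem.Chars.upperChar c).toNat = c.toNat - 32 := by
  have hl : PySem.Chars.islower c = true := by
    simp only [PySem.Chars.islower, Bool.and_eq_true, decide_eq_true_iff]
    exact ⟨h.1, h.2⟩
  simp only [PySem.Chars.upperChar, hl, if_true]
  rw [Char.toNat_ofNat]
  have : (c.toNat - 32).isValidChar := by constructor; omega
  simp [this]
theorem pvUp_id {c : Char} (h : ¬ (97 ≤ c.toNat ∧ c.toNat ≤ 122)) :
    PySem.Chars.upperChar c = c := by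
  have hl : PySem.Chars.islower c = false := by
    rcases Bool.eq_false_or_eq_true (PySem.Chars.islower c) with h' | h'
    · exact absurd (by simpa only [PySem.Chars.islower, Bool.and_eq_true, decide_eq_true_iff] using h') h
    · exact h'
  simp [PySem.Chars.upperChar, hl]

theorem pvLow_iff (c : Char) : ('a' ≤ c ∧ c ≤ 'z') ↔ (97 ≤ c.toNat ∧ c.toNat ≤ 122) :=
  Iff.rfl

theorem pvCouple_iff (c d : Char) :
    pvCouple (c, d) = true ↔
      ((97 ≤ c.toNat ∧ c.toNat ≤ 122) ∧ d = PySem.Chars.upperChar c) ∨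
      ((97 ≤ d.toNat ∧ d.toNat ≤ 122) ∧ c = PySem.Chars.upperChar d) := by
  simp only [pvCouple, Bool.and_eq_true, beq_iff_eq, bne_iff_ne, ne_eq]
  by_cases hc : 97 ≤ c.toNat ∧ c.toNat ≤ 122 <;> by_cases hd : 97 ≤ d.toNat ∧ d.toNat ≤ 122
  · constructor
    · rintro ⟨he, hne⟩
      exact absurd (pvChar_eq_of_toNat (by have h1 := pvUp_toNat hc; have h2 := pvUp_toNat hd; have := congrArg Char.toNat he; omega)) hne
    · rintro (⟨_, rfl⟩ | ⟨_, rfl⟩)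
      · have := pvUp_toNat hc; omega
      · have := pvUp_toNat hd; omega
  · rw [pvUp_id hd]
    constructor
    · rintro ⟨he, hne⟩; exact Or.inl ⟨hc, he.symm⟩
    · rintro (⟨_, rfl⟩ | ⟨hd', _⟩)
      · have := pvUp_toNat hc
        exact ⟨rfl, fun he => by rw [he] at hc; omega⟩
      · exact absurd hd' hd
  · rw [pvUp_id hc]
    constructor
    · rintro ⟨he, hne⟩; exact Or.inr ⟨hd, he⟩
    · rintro (⟨hc', _⟩ | ⟨_, rfl⟩)
      · exact absurd hc' hc
      · have := pvUp_toNat hd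
        exact ⟨rfl, fun he => by rw [← he] at hd; omega⟩
  · rw [pvUp_id hc, pvUp_id hd]
    constructor
    · rintro ⟨he, hne⟩; exact absurd he hne
    · rintro (⟨hc', _⟩ | ⟨hd', _⟩)
      · exact absurd hc' hc
      · exact absurd hd' hd

theorem pvCouple_self (c : Char) : pvCouple (c, c) = false := by
  simp [pvCouple]

theorem pvChA_coe (rna : String) (i : Nat) :
    chA rna (i : Int) = rna.toList.getD i ' ' := by
  simp [chA, PySem.Str.pyGet?, PySem.Chars.pyGet?]

theorem pvChA_mem (rna : String) (i : Int) (h0 : 0 ≤ i) (h1 : i < pvN rna) :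
    chA rna i ∈ rna.toList := by
  have hi : i = ((i.toNat : Nat) : Int) := by omega
  have hlt : i.toNat < rna.toList.length := by
    simp only [pvN] at h1; omega
  rw [hi, pvChA_coe]
  rw [List.getD_eq_getElem _ _ hlt]
  exact List.getElem_mem hlt

theorem pvCountP_range_getD {α : Type} (l : List α) (d : α) (p : α → Bool) :
    (List.range l.length).countP (fun i => p (l.getD i d)) = l.countP p := by
  induction l with
  | nil => simp
  | cons a t ih =>
    rw [List.length_cons, List.range_succ_eq_map, List.countP_cons, List.countP_map,
      List.countP_cons]
    have h1 : (List.range t.length).countP ((fun i => p ((a :: t).getD i d)) ∘ (· + 1)) =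
        t.countP p := by
      rw [show ((fun i => p ((a :: t).getD i d)) ∘ (· + 1)) = fun i => p (t.getD i d) by
        funext i; simp]
      exact ih
    rw [h1]
    simp only [List.getD_cons_zero]

theorem pvCount_range (rna : String) (p : Char → Bool) :
    (PySem.List.pyRange 0 (pvN rna)).countP (fun i => p (chA rna i)) = rna.toList.countP p := by
  show (PySem.List.pyRange 0 ((rna.toList.length : Nat) : Int)).countP _ = _
  rw [PySem.List.pyRange_zero_natCast, List.countP_map]
  rw [List.countP_congr (q := fun i => p (rna.toList.getD i ' '))]
  · exact pvCountP_range_getD _ _ _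
  · intro x hx
    simp only [Function.comp, pvChA_coe]

theorem pvRange_nodup (rna : String) : (PySem.List.pyRange 0 (pvN rna)).Nodup := by
  show (PySem.List.pyRange 0 ((rna.toList.length : Nat) : Int)).Nodup
  rw [PySem.List.pyRange_zero_natCast]
  exact List.nodup_range.map (fun a b h => by omega)


theorem pvInner_id (rna : String) (x : Int) (zs : List Int) (P : List Int) (p : Int)
    (hx : x ∈ P) : zs.foldl (pvInner rna x) (P, p) = (P, p) := by
  induction zs with
  | nil => rfl
  | cons z t ih =>
    rw [List.foldl_cons]
    have : pvInner rna x (P, p) z = (P, p) := by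
      simp [pvInner, hx]
    rw [this, ih]

theorem pvInner_char (rna : String) (x : Int) (zs : List Int) (P : List Int) (p : Int)
    (hx : x ∉ P) :
    (zs.foldl (pvInner rna x) (P, p) = (P, p) ∧
      ∀ z ∈ zs, z ∉ P → pvCouple (chA rna x, chA rna z) = false) ∨
    (∃ z ∈ zs, z ∉ P ∧ pvCouple (chA rna x, chA rna z) = true ∧
      zs.foldl (pvInner rna x) (P, p) = (P ++ [x, z], p + 1)) := by
  induction zs with
  | nil => exact Or.inl ⟨rfl, by simp⟩
  | cons z t ih =>
    by_cases hc : pvCouple (chA rna x, chA rna z) = true ∧ z ∉ P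
    · refine Or.inr ⟨z, List.mem_cons_self, hc.2, hc.1, ?_⟩
      rw [List.foldl_cons]
      have h1 : pvInner rna x (P, p) z = (P ++ [x, z], p + 1) := by
        simp [pvInner, hx, hc.1, hc.2]
      rw [h1]
      exact pvInner_id rna x t _ _ (by simp)
    · have h1 : pvInner rna x (P, p) z = (P, p) := by
        rcases Bool.eq_false_or_eq_true (pvCouple (chA rna x, chA rna z)) with h | h
        · have hz : z ∈ P := by
            by_contra hz
            exact hc ⟨h, hz⟩
          simp [pvInner, hz]
        · simp [pvInner, h]
      rw [List.foldl_cons, h1]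
      rcases ih with ⟨he, hall⟩ | ⟨w, hw, hwP, hwc, he⟩
      · refine Or.inl ⟨he, ?_⟩
        intro z' hz' hz'P
        rcases List.mem_cons.mp hz' with rfl | hz'
        · rcases Bool.eq_false_or_eq_true (pvCouple (chA rna x, chA rna z')) with h | h
          · exact absurd ⟨h, hz'P⟩ hc
          · exact h
        · exact hall z' hz' hz'P
      · exact Or.inr ⟨w, List.mem_cons_of_mem _ hw, hwP, hwc, he⟩

theorem pvOuter_inv (rna : String) (k : Nat) (hk : (k : Int) ≤ pvN rna) :
    ∃ M : List (Int × Int),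
      (PySem.List.pyRange 0 (k : Int)).foldl (pvOuter rna) ([], 0) =
        (pvFlat M, (M.length : Int)) ∧
      (pvFlat M).Nodup ∧
      (∀ q ∈ M, pvPairOK rna q) ∧
      pvDead rna (k : Int) (pvFlat M) := by
  induction k with
  | zero =>
    refine ⟨[], ?_, ?_, ?_, ?_⟩
    · simp [PySem.List.pyRange, pvFlat]
    · simp [pvFlat]
    · simp
    · intro i h0 h1 _; omega
  | succ k ih =>
    have hk' : (k : Int) ≤ pvN rna := by push_cast at hk ⊢; omega
    obtain ⟨M, hfold, hnd, hok, hdead⟩ := ih hk'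
    have hsplit : PySem.List.pyRange 0 ((k + 1 : Nat) : Int) =
        PySem.List.pyRange 0 (k : Int) ++ [(k : Int)] := by
      push_cast
      exact PySem.List.pyRange_one_succ_right (by positivity)
    rw [hsplit, List.foldl_append, hfold, List.foldl_cons, List.foldl_nil]
    have hlen : PySem.Str.len rna = pvN rna := by
      rw [PySem.Str.len_eq]; rfl
    by_cases hxm : (k : Int) ∈ pvFlat M
    · refine ⟨M, ?_, hnd, hok, ?_⟩
      · simp only [pvOuter, pvInner_id rna _ _ _ _ hxm]
      · intro i h0 h1 hiP j hj0 hj1 hjP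
        rcases lt_or_ge i (k : Int) with h | h
        · exact hdead i h0 h hiP j hj0 hj1 hjP
        · exfalso
          apply hiP
          rw [show i = (k : Int) from by push_cast at h1; omega]
          exact hxm
    · rcases pvInner_char rna (k : Int) (PySem.List.pyRange 0 (PySem.Str.len rna)) (pvFlat M)
        (M.length : Int) hxm with ⟨he, hall⟩ | ⟨z, hz, hzP, hzc, he⟩
      · refine ⟨M, by simp only [pvOuter, he], hnd, hok, ?_⟩
        intro i h0 h1 hiP j hj0 hj1 hjP
        rcases lt_or_ge i (k : Int) with h | h
        · exact hdead i h0 h hiP j hj0 hj1 hjP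
        · have hik : i = (k : Int) := by push_cast at h1; omega
          subst hik
          exact hall j (by rw [hlen]; exact PySem.List.mem_pyRange_one.mpr ⟨hj0, hj1⟩) hjP
      · have hzb : 0 ≤ z ∧ z < pvN rna := by
          rw [hlen] at hz
          exact PySem.List.mem_pyRange_one.mp hz
        have hxz : (k : Int) ≠ z := by
          intro h
          rw [← h] at hzc
          rw [pvCouple_self] at hzc
          exact absurd hzc (by simp)
        have hflat : pvFlat (M ++ [((k : Int), z)]) = pvFlat M ++ [(k : Int), z] := by
          simp [pvFlat]
        have hlen2 : (((M ++ [((k : Int), z)]).length : Nat) : Int) = (M.length : Int) + 1 := by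
          simp
        refine ⟨M ++ [((k : Int), z)], ?_, ?_, ?_, ?_⟩
        · simp only [pvOuter, hflat, hlen2]
          exact he
        · rw [hflat]
          refine hnd.append (by simp [hxz]) ?_
          intro a haP ha2
          rcases List.mem_cons.mp ha2 with rfl | ha2
          · exact hxm haP
          · rcases List.mem_singleton.mp ha2 with rfl
            exact hzP haP
        · intro q hq
          rcases List.mem_append.mp hq with h | h
          · exact hok q h
          · have : q = ((k : Int), z) := by simpa using h
            subst this
            exact ⟨by positivity, by push_cast at hk; omega, hzb.1, hzb.2, hzc⟩
        · intro i h0 h1 hiP j hj0 hj1 hjP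
          rw [hflat] at hiP hjP
          have hiP' : i ∉ pvFlat M := fun hm => hiP (List.mem_append_left _ hm)
          have hjP' : j ∉ pvFlat M := fun hm => hjP (List.mem_append_left _ hm)
          have hik : i ≠ (k : Int) := by
            intro h; subst h
            exact hiP (List.mem_append_right _ (by simp))
          have h1' : i < (k : Int) := by push_cast at h1; omega
          exact hdead i h0 h1' hiP' j hj0 hj1 hjP'

theorem pvSum_ind (S : List Char) (a : Char) (hS : S.Nodup) (ha : a ∈ S) :
    (S.map (fun c => if a == c then (1:Nat) else 0)).sum = 1 := by
  induction S with
  | nil => simp at ha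
  | cons b t ih =>
    simp only [List.map_cons, List.sum_cons]
    rcases List.mem_cons.mp ha with rfl | ha'
    · have hnot : a ∉ t := (List.nodup_cons.mp hS).1
      have h0 : (t.map (fun c => if a == c then (1:Nat) else 0)).sum = 0 := by
        apply List.sum_eq_zero
        intro x hx
        simp only [List.mem_map] at hx
        obtain ⟨c, hc, rfl⟩ := hx
        simp only [ite_eq_right_iff, beq_iff_eq]
        intro h; exact absurd (h ▸ hc) hnot
      rw [h0]
      simp
    · have hne : b ≠ a := by
        rintro rfl; exact (List.nodup_cons.mp hS).1 ha'
      rw [ih (List.nodup_cons.mp hS).2 ha']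
      simp [Ne.symm hne]
theorem pvCastSum (S : List Nat) : ((S.sum : Nat) : Int) = (S.map (fun x : Nat => (x : Int))).sum := by
  rw [Nat.cast_list_sum]

theorem pvLen_eq_sum (S : List Char) (hS : S.Nodup) (f : Int × Int → Char)
    (M : List (Int × Int)) (hf : ∀ a ∈ M, f a ∈ S) :
    M.length = (S.map (fun c => M.countP (fun a => f a == c))).sum := by
  induction M with
  | nil => simp
  | cons q M ih =>
    have h1 : (S.map (fun c => (q :: M).countP (fun a => f a == c))).sum =
        (S.map (fun c => M.countP (fun a => f a == c))).sum +
        (S.map (fun c => if f q == c then (1:Nat) else 0)).sum := by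
      rw [← List.sum_map_add]
      have : S.map (fun c => M.countP (fun a => f a == c) + if f q == c then (1:Nat) else 0) =
          S.map (fun c => (q :: M).countP (fun a => f a == c)) := by
        apply List.map_eq_map_iff.mpr
        intro c _
        rw [List.countP_cons]
      rw [this]
    rw [List.length_cons, h1, pvSum_ind S (f q) hS (hf q List.mem_cons_self),
      ih (fun a ha => hf a (List.mem_cons_of_mem _ ha))]

theorem pvKey_spec (rna : String) (q : Int × Int) (h : pvPairOK rna q) :
    (97 ≤ (pvKey rna q).toNat ∧ (pvKey rna q).toNat ≤ 122) ∧
    ((chA rna q.1 = pvKey rna q ∧ chA rna q.2 = PySem.Chars.upperChar (pvKey rna q)) ∨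
     (chA rna q.2 = pvKey rna q ∧ chA rna q.1 = PySem.Chars.upperChar (pvKey rna q))) := by
  obtain ⟨_, _, _, _, hc⟩ := h
  rcases (pvCouple_iff _ _).mp hc with ⟨hb, he⟩ | ⟨hb, he⟩
  · have hkey : pvKey rna q = chA rna q.1 := by
      simp only [pvKey, if_pos ((pvLow_iff _).mpr hb)]
    rw [hkey]
    exact ⟨hb, Or.inl ⟨rfl, he⟩⟩
  · have hnot : ¬ ('a' ≤ chA rna q.1 ∧ chA rna q.1 ≤ 'z') := by
      rw [pvLow_iff, he, pvUp_toNat hb]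
      omega
    have hkey : pvKey rna q = chA rna q.2 := by
      simp only [pvKey, if_neg hnot]
    rw [hkey]
    exact ⟨hb, Or.inr ⟨rfl, he⟩⟩

theorem pvFlat_count_low (rna : String) (M : List (Int × Int))
    (hM : ∀ q ∈ M, pvPairOK rna q) (c : Char) (hc : 97 ≤ c.toNat ∧ c.toNat ≤ 122) :
    (pvFlat M).countP (fun i => chA rna i == c) = M.countP (fun q => pvKey rna q == c) := by
  induction M with
  | nil => simp [pvFlat]
  | cons q M ih =>
    have hq := pvKey_spec rna q (hM q List.mem_cons_self)
    have hupne : ∀ k : Char, 97 ≤ k.toNat ∧ k.toNat ≤ 122 →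
        (PySem.Chars.upperChar k == c) = false := by
      intro k hk
      simp only [beq_eq_false_iff_ne, ne_eq]
      intro he
      have := pvUp_toNat hk
      rw [he] at this
      omega
    have hflat : pvFlat (q :: M) = q.1 :: q.2 :: pvFlat M := by simp [pvFlat]
    rw [hflat, List.countP_cons, List.countP_cons, List.countP_cons,
      ih (fun a ha => hM a (List.mem_cons_of_mem _ ha))]
    rcases hq.2 with ⟨h1, h2⟩ | ⟨h1, h2⟩
    · rw [h1, h2, hupne _ hq.1]
      cases hkc : (pvKey rna q == c) <;> simp
    · rw [h1, h2, hupne _ hq.1]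
      cases hkc : (pvKey rna q == c) <;> simp

theorem pvFlat_count_up (rna : String) (M : List (Int × Int))
    (hM : ∀ q ∈ M, pvPairOK rna q) (c : Char) (hc : 97 ≤ c.toNat ∧ c.toNat ≤ 122) :
    (pvFlat M).countP (fun i => chA rna i == PySem.Chars.upperChar c) =
      M.countP (fun q => pvKey rna q == c) := by
  induction M with
  | nil => simp [pvFlat]
  | cons q M ih =>
    have hq := pvKey_spec rna q (hM q List.mem_cons_self)
    have hlowne : (pvKey rna q == PySem.Chars.upperChar c) = false := by
      simp only [beq_eq_false_iff_ne, ne_eq]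
      intro he
      have := pvUp_toNat hc
      rw [← he] at this
      have := hq.1
      omega
    have hupiff : (PySem.Chars.upperChar (pvKey rna q) == PySem.Chars.upperChar c) =
        (pvKey rna q == c) := by
      cases h : (pvKey rna q == c) with
      | false =>
        simp only [beq_eq_false_iff_ne, ne_eq] at h ⊢
        intro he
        apply h
        apply pvChar_eq_of_toNat
        have h1 := pvUp_toNat hq.1
        have h2 := pvUp_toNat hc
        have := congrArg Char.toNat he
        omega
      | true =>
        have h' : pvKey rna q = c := by simpa using h
        rw [h']
        simp
    have hflat : pvFlat (q :: M) = q.1 :: q.2 :: pvFlat M := by simp [pvFlat]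
    rw [hflat, List.countP_cons, List.countP_cons, List.countP_cons,
      ih (fun a ha => hM a (List.mem_cons_of_mem _ ha))]
    rcases hq.2 with ⟨h1, h2⟩ | ⟨h1, h2⟩
    · rw [h1, h2, hlowne, hupiff]
      cases hkc : (pvKey rna q == c) <;> simp
    · rw [h1, h2, hlowne, hupiff]
      cases hkc : (pvKey rna q == c) <;> simp

theorem pvCount_le (rna : String) (P : List Int) (hnd : P.Nodup)
    (hb : ∀ i ∈ P, 0 ≤ i ∧ i < pvN rna) (p : Char → Bool) :
    P.countP (fun i => p (chA rna i)) ≤ rna.toList.countP p := by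
  rw [← pvCount_range rna p]
  apply List.Subperm.countP_le
  apply hnd.subperm
  intro a ha
  exact PySem.List.mem_pyRange_one.mpr ⟨(hb a ha).1, (hb a ha).2⟩

theorem pvExists_unpaired (rna : String) (P : List Int) (p : Char → Bool)
    (h : P.countP (fun i => p (chA rna i)) < rna.toList.countP p) :
    ∃ i : Int, 0 ≤ i ∧ i < pvN rna ∧ p (chA rna i) = true ∧ i ∉ P := by
  by_contra hcon
  push Not at hcon
  have hsub : ∀ a ∈ (PySem.List.pyRange 0 (pvN rna)).filter (fun i => p (chA rna i)), a ∈ P := by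
    intro a ha
    have h1 := List.mem_filter.mp ha
    have h2 := PySem.List.mem_pyRange_one.mp h1.1
    exact hcon a h2.1 h2.2 h1.2
  have hF : ((PySem.List.pyRange 0 (pvN rna)).filter (fun i => p (chA rna i))).Subperm P :=
    ((pvRange_nodup rna).filter _).subperm hsub
  have h3 := hF.countP_le (fun i => p (chA rna i))
  rw [List.countP_filter] at h3
  simp only [Bool.and_self] at h3
  rw [pvCount_range rna p] at h3
  omega

theorem pvFlat_bounds (rna : String) (M : List (Int × Int)) (hM : ∀ q ∈ M, pvPairOK rna q) :
    ∀ i ∈ pvFlat M, 0 ≤ i ∧ i < pvN rna := by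
  intro i hi
  simp only [pvFlat, List.mem_flatMap] at hi
  obtain ⟨q, hq, hiq⟩ := hi
  obtain ⟨h1, h2, h3, h4, _⟩ := hM q hq
  rcases List.mem_cons.mp hiq with rfl | hiq
  · exact ⟨h1, h2⟩
  · rcases List.mem_singleton.mp hiq with rfl
    exact ⟨h3, h4⟩

theorem pvM_count_eq_min (rna : String) (M : List (Int × Int))
    (hM : ∀ q ∈ M, pvPairOK rna q) (hnd : (pvFlat M).Nodup)
    (hdead : pvDead rna (pvN rna) (pvFlat M))
    (c : Char) (hc : 97 ≤ c.toNat ∧ c.toNat ≤ 122) :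
    M.countP (fun q => pvKey rna q == c) =
      min (rna.toList.count c) (rna.toList.count (PySem.Chars.upperChar c)) := by
  have hb := pvFlat_bounds rna M hM
  have hlow := pvFlat_count_low rna M hM c hc
  have hup := pvFlat_count_up rna M hM c hc
  have h1 : M.countP (fun q => pvKey rna q == c) ≤ rna.toList.count c := by
    rw [← hlow, List.count_eq_countP]
    exact pvCount_le rna _ hnd hb (fun ch => ch == c)
  have h2 : M.countP (fun q => pvKey rna q == c) ≤ rna.toList.count (PySem.Chars.upperChar c) := by
    rw [← hup, List.count_eq_countP]
    exact pvCount_le rna _ hnd hb (fun ch => ch == PySem.Chars.upperChar c)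
  have h3 : ¬ (M.countP (fun q => pvKey rna q == c) < rna.toList.count c ∧
      M.countP (fun q => pvKey rna q == c) < rna.toList.count (PySem.Chars.upperChar c)) := by
    rintro ⟨ha, hb'⟩
    obtain ⟨i, hi0, hi1, hip, hiP⟩ := pvExists_unpaired rna (pvFlat M) (fun ch => ch == c)
      (by rw [hlow, ← List.count_eq_countP]; exact ha)
    obtain ⟨j, hj0, hj1, hjp, hjP⟩ := pvExists_unpaired rna (pvFlat M)
      (fun ch => ch == PySem.Chars.upperChar c)
      (by rw [hup, ← List.count_eq_countP]; exact hb')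
    have hic : chA rna i = c := by simpa using hip
    have hjc : chA rna j = PySem.Chars.upperChar c := by simpa using hjp
    have hcouple : pvCouple (chA rna i, chA rna j) = true := by
      rw [hic, hjc]
      exact (pvCouple_iff _ _).mpr (Or.inl ⟨hc, rfl⟩)
    rw [hdead i hi0 hi1 hiP j hj0 hj1 hjP] at hcouple
    exact absurd hcouple (by simp)
  omega

theorem pvA_eq_sum (rna : String) :
    total_pairs rna =
      (((PySem.Set.ofList rna.toList).filter (fun c => decide ('a' ≤ c ∧ c ≤ 'z'))).map
        (fun c => ((min (rna.toList.count c) (rna.toList.count (PySem.Chars.upperChar c)) : Nat) : Int))).sum := by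
  obtain ⟨M, hfold, hnd, hok, hdead⟩ := pvOuter_inv rna rna.toList.length le_rfl
  have htp : total_pairs rna = (M.length : Int) := by
    have h2 := congrArg Prod.snd hfold
    simp only [total_pairs, PySem.Str.len_eq]
    exact h2
  set S := ((PySem.Set.ofList rna.toList).filter (fun c => decide ('a' ≤ c ∧ c ≤ 'z'))) with hSdef
  have hSnodup : S.Nodup := (PySem.Set.nodup_ofList rna.toList).filter _
  have hf : ∀ q ∈ M, pvKey rna q ∈ S := by
    intro q hq
    obtain ⟨hkb, hcase⟩ := pvKey_spec rna q (hok q hq)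
    obtain ⟨h1, h2, h3, h4, _⟩ := hok q hq
    rw [hSdef, List.mem_filter]
    constructor
    · apply (PySem.Set.mem_ofList _ _).mpr
      rcases hcase with ⟨he, _⟩ | ⟨he, _⟩
      · rw [← he]; exact pvChA_mem rna q.1 h1 h2
      · rw [← he]; exact pvChA_mem rna q.2 h3 h4
    · exact decide_eq_true ((pvLow_iff _).mpr hkb)
  have hlen := pvLen_eq_sum S hSnodup (pvKey rna) M hf
  have hterm : S.map (fun c => M.countP (fun a => pvKey rna a == c)) =
      S.map (fun c => min (rna.toList.count c) (rna.toList.count (PySem.Chars.upperChar c))) := by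
    apply List.map_eq_map_iff.mpr
    intro c hcS
    have hcb : 97 ≤ c.toNat ∧ c.toNat ≤ 122 := by
      have := (List.mem_filter.mp (hSdef ▸ hcS)).2
      exact (pvLow_iff c).mp (of_decide_eq_true this)
    exact pvM_count_eq_min rna M hok hnd (by exact hdead) c hcb
  rw [htp, hlen, hterm, pvCastSum, List.map_map]
  rfl

theorem pvB_eq_sum (rna : String) :
    total_pairs_alt rna =
      (((PySem.Set.ofList rna.toList).filter (fun c => decide ('a' ≤ c ∧ c ≤ 'z'))).map
        (fun c => ((min (rna.toList.count c) (rna.toList.count (PySem.Chars.upperChar c)) : Nat) : Int))).sum := by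
  rw [total_pairs_alt]
  simp only [PySem.Dict.foldl_insert_getD_add_one_eq_counter]
  rw [PySem.Dict.keys_counter]
  rw [PySem.List.foldl_ite_eq_foldl_filter (p := fun c => 'a' ≤ c ∧ c ≤ 'z')
    (f := fun pairs c => pairs + min ((PySem.Dict.counter rna.toList).getD c 0)
      ((PySem.Dict.counter rna.toList).getD (PySem.Chars.upperChar c) 0))]
  rw [PySem.List.foldl_add]
  rw [zero_add]
  apply congrArg
  apply List.map_eq_map_iff.mpr
  intro c hc
  rw [PySem.Dict.getD_counter, PySem.Dict.getD_counter]
  rw [Nat.cast_min]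

-- ===== VERDICT (by name: the statement is the Claim_ definition above) =====
theorem total_pairs_spec : Claim_equal_total_pairs := by
  intro rna _
  unfold Spec_total_pairs
  rw [pvA_eq_sum, pvB_eq_sum]
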